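-- pv_equiv track=rewrite | github.com/rgertenbach/aoc | 2025/day10/day10.py | match_joltage
-- ===== SOURCE A (Python) =====
-- def match_joltage(state: list[int], pattern: list[int]) -> int:
--     all_match = True
--     for s, p in zip(state, pattern):
--         if s > p:
--             return 1
--         if s < p:
--             all_match = False
--     if all_match:
--         return 0
--     return -1
-- ===== SOURCE B (Python) =====
-- def match_joltage(state: list[int], pattern: list[int]) -> int:
--     pairs = list(zip(state, pattern))
--     if any(s > p for s, p in pairs):
--         return 1
--     if any(s < p for s, p in pairs):
--         return -1
--     return 0
-- ===== Notes on version B (the rewrite author's own statement) =====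
-- stated objective: simpler
-- what changed: Replaced the single flag-carrying loop with early return by two independent any() aggregates over the zipped pairs followed by a final decision (1 / -1 / 0).
import Mathlib
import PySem

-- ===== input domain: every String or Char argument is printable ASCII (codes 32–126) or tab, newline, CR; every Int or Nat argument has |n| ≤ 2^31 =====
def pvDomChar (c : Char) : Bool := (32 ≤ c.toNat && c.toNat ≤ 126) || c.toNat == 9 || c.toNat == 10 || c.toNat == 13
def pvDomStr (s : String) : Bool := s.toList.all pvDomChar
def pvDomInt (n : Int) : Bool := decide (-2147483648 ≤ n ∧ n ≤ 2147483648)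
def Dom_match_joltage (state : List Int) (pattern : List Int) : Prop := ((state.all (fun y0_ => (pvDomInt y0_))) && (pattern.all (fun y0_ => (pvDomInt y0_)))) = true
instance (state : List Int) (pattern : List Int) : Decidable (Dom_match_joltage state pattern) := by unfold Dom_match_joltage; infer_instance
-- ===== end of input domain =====

-- B replaces A's single flag-carrying loop with two independent any-aggregates over the zipped pairs (simpler decomposition).

-- ===== PORT A =====
-- loop over zip(state, pattern) carrying the `all_match` flag, early-returning 1 on s > p
def matchJoltageLoop : List (Int × Int) → Bool → Int
  | [], allMatch => if allMatch then 0 else -1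
  | (s, p) :: rest, allMatch =>
    if s > p then 1
    else if s < p then matchJoltageLoop rest false
    else matchJoltageLoop rest allMatch

def match_joltage (state : List Int) (pattern : List Int) : Int :=
  matchJoltageLoop (state.zip pattern) true

-- ===== PORT B =====
def match_joltage_alt (state : List Int) (pattern : List Int) : Int :=
  let pairs := state.zip pattern
  if pairs.any (fun sp => sp.1 > sp.2) then 1
  else if pairs.any (fun sp => sp.1 < sp.2) then -1
  else 0

-- ===== PRECONDITION & SPEC =====
def Spec_match_joltage (state : List Int) (pattern : List Int) (out : Int) : Prop := out = match_joltage_alt state pattern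
instance (state : List Int) (pattern : List Int) (out : Int) : Decidable (Spec_match_joltage state pattern out) := by unfold Spec_match_joltage; infer_instance

-- ===== CLAIM (what is proved, stated in full; the proofs are below) =====
def Claim_equal_match_joltage : Prop := ∀ (state : List Int) (pattern : List Int), Dom_match_joltage state pattern → Spec_match_joltage state pattern (match_joltage state pattern)

-- ===== LEMMAS AND PROOFS =====
theorem matchJoltageLoop_eq (l : List (Int × Int)) (b : Bool) :
    matchJoltageLoop l b =
      if l.any (fun sp => sp.1 > sp.2) then 1
      else if l.any (fun sp => sp.1 < sp.2) then -1
      else if b then 0 else -1 := by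
  induction l generalizing b with
  | nil => simp [matchJoltageLoop]
  | cons hd tl ih =>
    obtain ⟨s, p⟩ := hd
    simp only [matchJoltageLoop, List.any_cons]
    by_cases hgt : s > p
    · rw [if_pos hgt, decide_eq_true hgt]
      simp
    · rw [if_neg hgt, decide_eq_false hgt, Bool.false_or]
      by_cases hlt : s < p
      · rw [if_pos hlt, ih]
        simp only [decide_eq_true hlt, Bool.true_or]
        simp
      · rw [if_neg hlt, ih]
        simp only [decide_eq_false hlt, Bool.false_or]

-- ===== VERDICT (by name: the statement is the Claim_ definition above) =====
theorem match_joltage_spec : Claim_equal_match_joltage := by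
  intro state pattern _
  unfold Spec_match_joltage match_joltage match_joltage_alt
  rw [matchJoltageLoop_eq]
  simp
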